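-- pv_equiv track=rewrite | github.com/lucatume/completamente | rhdp/83-harness-docsearch-kotlin-prototype-runner.py | resolve_docsets
-- ===== SOURCE A (Python) =====
-- PLATFORM_ALIASES = {
--     "php": ["php"], "wordpress": ["wordpress"], "wp": ["wordpress"],
--     "laravel": ["laravel"], "react": ["react"],
--     "javascript": ["javascript"], "js": ["javascript"],
--     "typescript": ["react", "nodejs"], "ts": ["react", "nodejs"],
--     "node": ["nodejs"], "nodejs": ["nodejs"],
-- }
--
-- def resolve_docsets(docsets: str | None) -> list[str]:
--     if not docsets:
--         return ["php", "wordpress", "laravel", "react", "javascript", "nodejs"]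
--     result = []
--     for alias in docsets.split(","):
--         alias = alias.strip().lower()
--         for p in PLATFORM_ALIASES.get(alias, [alias]):
--             if p not in result:
--                 result.append(p)
--     return result
-- ===== SOURCE B (Python) =====
-- PLATFORM_ALIASES = {
--     "php": ["php"], "wordpress": ["wordpress"], "wp": ["wordpress"],
--     "laravel": ["laravel"], "react": ["react"],
--     "javascript": ["javascript"], "js": ["javascript"],
--     "typescript": ["react", "nodejs"], "ts": ["react", "nodejs"],
--     "node": ["nodejs"], "nodejs": ["nodejs"],
-- }
--
-- def resolve_docsets(docsets):
--     if not docsets: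
--         return ["php", "wordpress", "laravel", "react", "javascript", "nodejs"]
--     out = [p for alias in docsets.split(",")
--              for p in PLATFORM_ALIASES.get(alias.strip().lower(),
--                                            [alias.strip().lower()])]
--     i = 0
--     while i < len(out):
--         j = i + 1
--         while j < len(out):
--             if out[j] == out[i]:
--                 del out[j]
--             else:
--                 j += 1
--         i += 1
--     return out
-- ===== Notes on version B (the rewrite author's own statement) =====
-- stated objective: alternative
-- what changed: A deduplicates while building (membership check before every append inside the alias loop); B first flattens all alias expansions into one list with a comprehension and then removes later duplicates in place with a two-cursor index scan deleting out[j] whenever it repeats out[i].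
import Mathlib
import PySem

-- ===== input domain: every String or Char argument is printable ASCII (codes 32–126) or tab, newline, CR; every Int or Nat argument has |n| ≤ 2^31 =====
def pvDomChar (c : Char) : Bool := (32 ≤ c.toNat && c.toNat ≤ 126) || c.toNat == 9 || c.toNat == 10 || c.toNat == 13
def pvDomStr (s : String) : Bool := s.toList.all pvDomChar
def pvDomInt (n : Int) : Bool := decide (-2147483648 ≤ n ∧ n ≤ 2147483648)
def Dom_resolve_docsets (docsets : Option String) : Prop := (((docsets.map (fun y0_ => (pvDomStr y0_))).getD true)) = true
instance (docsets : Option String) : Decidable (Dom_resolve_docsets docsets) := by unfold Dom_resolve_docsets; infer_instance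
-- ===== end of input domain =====

-- B replaces A's dedup-while-building loop (membership check before every append) by a
-- flatten-everything comprehension followed by in-place deletion of later duplicates with
-- two index cursors; objective: alternative (same observable result, different algorithm).

-- module constant PLATFORM_ALIASES (shared by both sources)
def PLATFORM_ALIASES : PySem.Dict String (List String) :=
  PySem.Dict.ofList
    [("php", ["php"]), ("wordpress", ["wordpress"]), ("wp", ["wordpress"]),
     ("laravel", ["laravel"]), ("react", ["react"]),
     ("javascript", ["javascript"]), ("js", ["javascript"]),
     ("typescript", ["react", "nodejs"]), ("ts", ["react", "nodejs"]),
     ("node", ["nodejs"]), ("nodejs", ["nodejs"])]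

-- ===== PORT A =====
def resolve_docsets (docsets : Option String) : List String :=
  match docsets with
  | none => ["php", "wordpress", "laravel", "react", "javascript", "nodejs"]
  | some s =>
    if s = "" then ["php", "wordpress", "laravel", "react", "javascript", "nodejs"]
    else
      ((PySem.Str.split? s ",").getD []).foldl (fun result al =>
        let a := PySem.Str.lower (PySem.Str.strip al)
        (PLATFORM_ALIASES.getD a [a]).foldl
          (fun r p => if p ∈ r then r else r ++ [p]) result) []

-- ===== PORT B =====
-- inner while loop: j scans forward from i+1, deleting out[j] when it equals out[i];
-- the while loop is ported with a fuel bound (each iteration either consumes j or shortens out)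
def pvInnerGo : Nat → List String → Nat → Nat → List String
  | 0, out, _, _ => out
  | fuel + 1, out, i, j =>
    if j < out.length then
      if out[j]! = out[i]! then pvInnerGo fuel (out.eraseIdx j) i j
      else pvInnerGo fuel out i (j + 1)
    else out

-- outer while loop: advance i after purging duplicates of out[i]
def pvOuterGo : Nat → List String → Nat → List String
  | 0, out, _ => out
  | fuel + 1, out, i =>
    if i < out.length then pvOuterGo fuel (pvInnerGo out.length out i (i + 1)) (i + 1)
    else out

def resolve_docsets_alt (docsets : Option String) : List String :=
  match docsets with
  | none => ["php", "wordpress", "laravel", "react", "javascript", "nodejs"]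
  | some s =>
    if s = "" then ["php", "wordpress", "laravel", "react", "javascript", "nodejs"]
    else
      let out := ((PySem.Str.split? s ",").getD []).flatMap (fun al =>
        let a := PySem.Str.lower (PySem.Str.strip al)
        PLATFORM_ALIASES.getD a [a])
      pvOuterGo out.length out 0

-- ===== PRECONDITION & SPEC =====
def Spec_resolve_docsets (docsets : Option String) (out : List String) : Prop := out = resolve_docsets_alt docsets
instance (docsets : Option String) (out : List String) : Decidable (Spec_resolve_docsets docsets out) := by unfold Spec_resolve_docsets; infer_instance

-- ===== CLAIM (what is proved, stated in full; the proofs are below) =====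
def Claim_equal_resolve_docsets : Prop := ∀ (docsets : Option String), Dom_resolve_docsets docsets → Spec_resolve_docsets docsets (resolve_docsets docsets)

-- ===== LEMMAS AND PROOFS =====

-- proof-side reference dedup: keep the head, filter it out of the tail, recurse
def pvDedupF (l : List String) : List String :=
  match l with
  | [] => []
  | x :: xs => x :: pvDedupF (xs.filter (fun y => y != x))
termination_by l.length
decreasing_by
  simp only [List.length_unattach, List.length_cons]
  exact Nat.lt_succ_of_le (le_trans (List.length_filter_le _ _) (by simp))

theorem pvDedupF_nil : pvDedupF [] = [] := by rw [pvDedupF.eq_def]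

theorem pvDedupF_cons (x : String) (xs : List String) :
    pvDedupF (x :: xs) = x :: pvDedupF (xs.filter (fun y => y != x)) := by rw [pvDedupF.eq_def]

-- A's membership-checked append is Python set insertion
theorem pv_ins_eq_add : (fun (r : List String) (p : String) => if p ∈ r then r else r ++ [p]) = PySem.Set.add := by
  funext r p
  simp [PySem.Set.add]

-- folding set insertion alias-by-alias over the expansions = folding it over the flattened list
theorem pv_nested_foldl (g : String → List String) (als : List String) (acc : List String) :
    als.foldl (fun r al => (g al).foldl PySem.Set.add r) acc
      = (als.flatMap g).foldl PySem.Set.add acc := by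
  induction als generalizing acc with
  | nil => rfl
  | cons a rest ih => simp [List.flatMap_cons, List.foldl_append, ih]

-- A's dedup-while-building fold is pvDedupF of the not-yet-seen elements
theorem pv_foldl_add_eq_dedupF (l acc : List String) :
    l.foldl PySem.Set.add acc = acc ++ pvDedupF (l.filter (fun x => !(acc.contains x))) := by
  induction l generalizing acc with
  | nil => simp [pvDedupF_nil]
  | cons x xs ih =>
    by_cases hx : x ∈ acc
    · have hadd : PySem.Set.add acc x = acc := by simp [PySem.Set.add, hx]
      rw [List.foldl_cons, hadd, ih]
      simp [hx]
    · have hadd : PySem.Set.add acc x = acc ++ [x] := by simp [PySem.Set.add, hx]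
      have hfil : (xs.filter (fun y => !((acc ++ [x]).contains y)))
          = (xs.filter (fun y => !(acc.contains y))).filter (fun y => y != x) := by
        rw [List.filter_filter]
        apply List.filter_congr
        intro y _
        by_cases hy : y = x <;> by_cases hya : y ∈ acc <;> simp [hy, hya]
      rw [List.foldl_cons, hadd, ih, hfil]
      simp [hx, pvDedupF_cons]

-- the inner while loop deletes exactly the later occurrences of x (one fuel unit per todo element)
theorem pvInner_spec (todo : List String) : ∀ (fuel : Nat) (kept pre : List String) (x : String),
    todo.length ≤ fuel → (∀ y ∈ kept, y ≠ x) →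
    pvInnerGo fuel (pre ++ x :: kept ++ todo) pre.length (pre.length + 1 + kept.length)
      = pre ++ x :: kept ++ todo.filter (fun y => y != x) := by
  induction todo with
  | nil =>
    intro fuel kept pre x _ _
    match fuel with
    | 0 => simp [pvInnerGo]
    | f + 1 =>
      rw [pvInnerGo, if_neg (by simp; omega)]
      simp
  | cons t ts ih =>
    intro fuel kept pre x hf hk
    match fuel with
    | 0 => simp at hf
    | f + 1 =>
      have hi : (pre ++ x :: kept ++ t :: ts)[pre.length]! = x := by simp
      have hj : (pre ++ x :: kept ++ t :: ts)[pre.length + 1 + kept.length]! = t := by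
        rw [show pre ++ x :: kept ++ t :: ts = (pre ++ x :: kept) ++ t :: ts by simp]
        rw [List.getElem!_eq_getElem?_getD]
        rw [List.getElem?_append_right (by simp; omega)]
        simp only [List.length_append, List.length_cons]
        rw [show pre.length + 1 + kept.length - (pre.length + (kept.length + 1)) = 0 by omega]
        rfl
      rw [pvInnerGo, if_pos (by simp; omega), hi, hj]
      by_cases ht : t = x
      · rw [if_pos ht]
        have herase : (pre ++ x :: kept ++ t :: ts).eraseIdx (pre.length + 1 + kept.length)
            = pre ++ x :: kept ++ ts := by
          rw [show pre ++ x :: kept ++ t :: ts = (pre ++ x :: kept) ++ t :: ts by simp]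
          rw [List.eraseIdx_append_of_length_le (by simp; omega)]
          have h0 : pre.length + 1 + kept.length - (pre ++ x :: kept).length = 0 := by simp; omega
          rw [h0]; simp
        rw [herase, ih f kept pre x (by simp at hf; omega) hk]
        simp [ht]
      · rw [if_neg ht]
        have hre : pre ++ x :: kept ++ t :: ts = pre ++ x :: (kept ++ [t]) ++ ts := by simp
        have hlen : pre.length + 1 + kept.length + 1 = pre.length + 1 + (kept ++ [t]).length := by
          simp; omega
        rw [hre, hlen, ih f (kept ++ [t]) pre x (by simp at hf ⊢; omega) (by
          intro y hy
          rcases List.mem_append.mp hy with h | h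
          · exact hk y h
          · simp at h; subst h; exact ht)]
        simp [ht]

-- the outer loop from position i computes pvDedupF of the untouched suffix
theorem pvOuter_spec (n : Nat) : ∀ (rest pre : List String) (fuel : Nat),
    rest.length ≤ n → rest.length ≤ fuel →
    pvOuterGo fuel (pre ++ rest) pre.length = pre ++ pvDedupF rest := by
  induction n with
  | zero =>
    intro rest pre fuel h _
    have : rest = [] := List.eq_nil_of_length_eq_zero (by omega)
    subst this
    match fuel with
    | 0 => simp [pvOuterGo, pvDedupF_nil]
    | f + 1 => rw [pvOuterGo]; simp [pvDedupF_nil]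
  | succ n ih =>
    intro rest pre fuel h hfuel
    match rest with
    | [] =>
      match fuel with
      | 0 => simp [pvOuterGo, pvDedupF_nil]
      | f + 1 => rw [pvOuterGo]; simp [pvDedupF_nil]
    | x :: r =>
      match fuel with
      | 0 => simp at hfuel
      | f + 1 =>
        rw [pvOuterGo, if_pos (by simp)]
        have hinner := pvInner_spec r (pre ++ x :: r).length [] pre x
          (by simp; omega) (by simp)
        simp only [List.length_nil, Nat.add_zero,
                   List.append_assoc, List.singleton_append] at hinner
        rw [hinner]
        have heq : pre ++ x :: r.filter (fun y => y != x)
            = (pre ++ [x]) ++ r.filter (fun y => y != x) := by simp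
        rw [heq, show pre.length + 1 = (pre ++ [x]).length by simp]
        rw [ih (r.filter (fun y => y != x)) (pre ++ [x]) f
              (by have := List.length_filter_le (fun y => y != x) r; simp at h ⊢; omega)
              (by have := List.length_filter_le (fun y => y != x) r; simp at hfuel ⊢; omega)]
        simp [pvDedupF_cons]

-- ===== VERDICT (by name: the statement is the Claim_ definition above) =====
theorem resolve_docsets_spec : Claim_equal_resolve_docsets := by
  intro docsets _
  unfold Spec_resolve_docsets resolve_docsets resolve_docsets_alt
  cases docsets with
  | none => rfl
  | some s =>
    by_cases hs : s = ""
    · simp [hs]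
    · simp only [hs, ite_false]
      rw [pv_ins_eq_add, pv_nested_foldl, pv_foldl_add_eq_dedupF]
      have := pvOuter_spec (((PySem.Str.split? s ",").getD []).flatMap (fun al =>
        let a := PySem.Str.lower (PySem.Str.strip al)
        PLATFORM_ALIASES.getD a [a])).length _ [] _ (le_refl _) (le_refl _)
      simp only [List.nil_append, List.length_nil] at this
      rw [this]
      simp
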